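-- pv_equiv track=rewrite | github.com/humancipher/Programming_Contest | Programming_Contest/AtCoder/ABC/ABC_100-199/ABC_180-189/ABC_188/ABC_188_C.py | solve
-- ===== SOURCE A (Python) =====
-- def solve(A):
--     if len(A) == 2:
--         if A[0][0] < A[1][0]:
--             return A[0][1]
--         else:
--             return A[1][1]
--     else:
--         B = []
--         for i in range(0,len(A),2):
--             if A[i][0] < A[i+1][0]:
--                 B.append(A[i+1])
--             else:
--                 B.append(A[i])
--         return solve(B)
-- ===== SOURCE B (Python) =====
-- def solve(A):
--     # Half-champion scan: the tournament winner of each half is its first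
--     # maximum-strength player; the answer is the weaker of the two finalists.
--     def champ(xs):
--         best = xs[0]
--         for x in xs[1:]:
--             if best[0] < x[0]:
--                 best = x
--         return best
--     n = len(A) // 2
--     p = champ(A[:n])
--     q = champ(A[n:])
--     return p[1] if p[0] < q[0] else q[1]
-- ===== Notes on version B (the rewrite author's own statement) =====
-- stated objective: alternative
-- what changed: Replaces A's recursive round-by-round pairing with a single linear scan of each half for its first-maximum champion, returning the weaker finalist's index.
import Mathlib
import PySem

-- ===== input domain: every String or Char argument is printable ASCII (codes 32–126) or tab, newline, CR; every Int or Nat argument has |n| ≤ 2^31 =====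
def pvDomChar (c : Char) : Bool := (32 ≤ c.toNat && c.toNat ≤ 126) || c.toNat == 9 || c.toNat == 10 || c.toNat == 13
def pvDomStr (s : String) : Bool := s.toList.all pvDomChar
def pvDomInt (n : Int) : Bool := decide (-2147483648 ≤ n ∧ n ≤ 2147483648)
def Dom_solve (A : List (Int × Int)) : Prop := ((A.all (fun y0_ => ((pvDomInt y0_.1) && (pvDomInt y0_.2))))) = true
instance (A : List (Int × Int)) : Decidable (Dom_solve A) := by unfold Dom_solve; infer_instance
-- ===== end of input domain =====

-- B replaces A's recursive elimination rounds by one first-max scan of each half;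
-- equivalence is about the return value on power-of-two-length inputs (where A returns).

-- ===== PORT A =====
-- one elimination round: pairs (A[i], A[i+1]) keep the stronger, ties keep the earlier.
-- On an odd leftover element Python A raises IndexError (excluded by Pre_solve);
-- this port keeps the lone element there, which Pre_solve makes unreachable.
def pairRound : List (Int × Int) → List (Int × Int)
  | [] => []
  | [x] => [x]
  | x :: y :: rest => (if x.1 < y.1 then y else x) :: pairRound rest

theorem pairRound_length (l : List (Int × Int)) : (pairRound l).length = (l.length + 1) / 2 := by
  induction l using pairRound.induct <;> simp [pairRound, *] <;> try omega

def solve (A : List (Int × Int)) : Int :=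
  if A.length = 2 then
    -- A[0] / A[1]: in range when length = 2, so getD's default is unreachable
    let x := A.getD 0 (0, 0)
    let y := A.getD 1 (0, 0)
    if x.1 < y.1 then x.2 else y.2
  else if A.length < 2 then 0  -- Python raises IndexError / RecursionError here; excluded by Pre_solve
  else solve (pairRound A)
termination_by A.length
decreasing_by
  rw [pairRound_length]; omega

-- ===== PORT B =====
-- the loop body of B's champ: keep the current best unless strictly weaker
def pvMax (a b : Int × Int) : Int × Int := if a.1 < b.1 then b else a

-- first maximum-strength element of a list (B's champ; [] is unreachable under Pre_solve)
def champ : List (Int × Int) → Int × Int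
  | [] => (0, 0)
  | x :: rest => rest.foldl pvMax x

def solve_alt (A : List (Int × Int)) : Int :=
  let n := A.length / 2
  let p := champ (A.take n)   -- A[:n]
  let q := champ (A.drop n)   -- A[n:]
  if p.1 < q.1 then p.2 else q.2

-- ===== PRECONDITION & SPEC =====
-- Pre_solve: exactly the inputs where Python A returns: length a power of two, at least 2
-- (any other length reaches an odd round ≥ 3 and raises IndexError, or diverges below 2).
def Pre_solve (A : List (Int × Int)) : Prop :=
  2 ≤ A.length ∧ A.length = 2 ^ Nat.log2 A.length
instance (A : List (Int × Int)) : Decidable (Pre_solve A) := by unfold Pre_solve; infer_instance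

def pvWitness_solve : (List (Int × Int)) := [(1, 0), (2, 1)]

def Spec_solve (A : List (Int × Int)) (out : Int) : Prop := out = solve_alt A
instance (A : List (Int × Int)) (out : Int) : Decidable (Spec_solve A out) := by unfold Spec_solve; infer_instance

-- ===== CLAIM (what is proved, stated in full; the proofs are below) =====
def Claim_equal_solve : Prop := ∀ (A : List (Int × Int)), Dom_solve A → Pre_solve A → Spec_solve A (solve A)
-- ===== LEMMAS AND PROOFS =====

theorem pvMax_assoc (a b c : Int × Int) : pvMax (pvMax a b) c = pvMax a (pvMax b c) := by
  simp only [pvMax]; split_ifs <;> first | rfl | omega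

theorem foldl_pairRound (l : List (Int × Int)) (h : l.length % 2 = 0) (c : Int × Int) :
    (pairRound l).foldl pvMax c = l.foldl pvMax c := by
  induction l using pairRound.induct generalizing c with
  | case1 => rfl
  | case2 x => simp at h
  | case3 x y rest ih =>
    simp only [pairRound, List.foldl]
    rw [ih (by simp only [List.length_cons] at h; omega)]
    rw [show (if x.1 < y.1 then y else x) = pvMax x y from rfl, ← pvMax_assoc]

theorem champ_pairRound (l : List (Int × Int)) (h : l.length % 2 = 0) (hne : l ≠ []) :
    champ (pairRound l) = champ l := by
  match l with
  | x :: y :: rest =>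
    simp only [pairRound, champ, List.foldl]
    rw [foldl_pairRound rest (by simp only [List.length_cons] at h; omega)]
    rfl
  | [x] => simp at h

theorem pairRound_append (L R : List (Int × Int)) (h : L.length % 2 = 0) :
    pairRound (L ++ R) = pairRound L ++ pairRound R := by
  induction L using pairRound.induct with
  | case1 => rfl
  | case2 x => simp at h
  | case3 x y rest ih =>
    simp only [List.cons_append, pairRound, List.cons.injEq, true_and]
    exact ih (by simp only [List.length_cons] at h; omega)

-- main invariant: on lists of length 2^(k+1) A returns the weaker of the two half-champions
theorem solve_halves (k : Nat) :
    ∀ A : List (Int × Int), A.length = 2 ^ (k + 1) →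
      solve A = (if (champ (A.take (2 ^ k))).1 < (champ (A.drop (2 ^ k))).1
                 then (champ (A.take (2 ^ k))).2 else (champ (A.drop (2 ^ k))).2) := by
  induction k with
  | zero =>
    intro A hA
    have h2 : A.length = 2 := by simpa using hA
    obtain ⟨x, y, rfl⟩ := List.length_eq_two.mp h2
    simp [solve, champ, List.take, List.drop, List.foldl]
  | succ k ih =>
    intro A hA
    have hpow : (2:ℕ) ^ (k + 1 + 1) = 2 ^ (k + 1) + 2 ^ (k + 1) := by rw [pow_succ]; ring
    have hpow' : (2:ℕ) ^ (k + 1) = 2 ^ k + 2 ^ k := by rw [pow_succ]; ring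
    have hposk : 1 ≤ (2:ℕ) ^ k := Nat.one_le_two_pow
    have hlen2 : A.length ≠ 2 := by rw [hA]; omega
    have hge : ¬ A.length < 2 := by rw [hA]; omega
    rw [solve]
    simp only [hlen2, hge, if_false]
    -- split A into halves T ++ D
    have hsplit : A = A.take (2 ^ (k + 1)) ++ A.drop (2 ^ (k + 1)) := (List.take_append_drop _ _).symm
    have hT : (A.take (2 ^ (k + 1))).length = 2 ^ (k + 1) := by
      rw [List.length_take, hA]; omega
    have hD : (A.drop (2 ^ (k + 1))).length = 2 ^ (k + 1) := by
      rw [List.length_drop, hA]; omega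
    have hTe : (A.take (2 ^ (k + 1))).length % 2 = 0 := by rw [hT]; omega
    have hround : pairRound A = pairRound (A.take (2 ^ (k + 1))) ++ pairRound (A.drop (2 ^ (k + 1))) := by
      conv_lhs => rw [hsplit]
      exact pairRound_append _ _ hTe
    have hPRT : (pairRound (A.take (2 ^ (k + 1)))).length = 2 ^ k := by
      rw [pairRound_length, hT]; omega
    have hPRD : (pairRound (A.drop (2 ^ (k + 1)))).length = 2 ^ k := by
      rw [pairRound_length, hD]; omega
    have hPlen : (pairRound A).length = 2 ^ (k + 1) := by
      rw [hround, List.length_append, hPRT, hPRD]; omega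
    rw [ih (pairRound A) hPlen]
    have htake : (pairRound A).take (2 ^ k) = pairRound (A.take (2 ^ (k + 1))) := by
      rw [hround, ← hPRT, List.take_left]
    have hdrop : (pairRound A).drop (2 ^ k) = pairRound (A.drop (2 ^ (k + 1))) := by
      rw [hround, ← hPRT, List.drop_left]
    have hTne : A.take (2 ^ (k + 1)) ≠ [] := by
      intro h; rw [h] at hT; simp at hT; omega
    have hDne : A.drop (2 ^ (k + 1)) ≠ [] := by
      intro h; rw [h] at hD; simp at hD; omega
    have hDe : (A.drop (2 ^ (k + 1))).length % 2 = 0 := by rw [hD]; omega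
    rw [htake, hdrop, champ_pairRound _ hTe hTne, champ_pairRound _ hDe hDne]

-- ===== VERDICT (by name: the statement is the Claim_ definition above) =====
theorem solve_spec : Claim_equal_solve := by
  intro A _ hpre
  obtain ⟨h2, hlog⟩ := hpre
  have hlg : 1 ≤ Nat.log2 A.length := by
    by_contra h
    have : Nat.log2 A.length = 0 := by omega
    rw [this] at hlog; simp at hlog; omega
  obtain ⟨k, hk⟩ : ∃ k, Nat.log2 A.length = k + 1 := ⟨Nat.log2 A.length - 1, by omega⟩
  have hA : A.length = 2 ^ (k + 1) := by rw [hlog, hk]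
  show solve A = solve_alt A
  rw [solve_halves k A hA]
  have hn : A.length / 2 = 2 ^ k := by
    have hpow : (2:ℕ) ^ (k + 1) = 2 ^ k + 2 ^ k := by rw [pow_succ]; ring
    rw [hA]; omega
  simp only [solve_alt, hn]
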